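-- pv_equiv track=rewrite | github.com/Fabinout/plint | vowels.py | make_query
-- ===== SOURCE A (Python) =====
-- def clear(x):
--   return (x['text'] + ' ') if 'wordend' in x else x['text']
--
-- def intersperse(a, b):
--   if (len(a) == 0 or a[0] == ' ') and (len(b) == 0 or b[0] == ' '):
--     return []
--   if len(a) == 0 or a[0] == ' ':
--     return ["/", b[0]] + intersperse(a, b[1:])
--   if len(b) == 0 or b[0] == ' ':
--     return [a[0], "/"] + intersperse(a[1:], b)
--   return [a[0], b[0]] + intersperse(a[1:], b[1:])
--
-- def make_query(chunks, pos):
--   cleared = [clear(x) for x in chunks]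
--   if cleared[pos].endswith(' '):
--     cleared[pos] = cleared[pos].rstrip()
--     if pos + 1 <= len(cleared):
--       cleared[pos+1] = " " + cleared[pos+1]
--     else:
--       cleared.append(' ')
--
--   return [cleared[pos]] + intersperse(
--       ''.join(cleared[pos+1:]),
--       ''.join([x[::-1] for x in cleared[:pos][::-1]]))
-- ===== SOURCE B (Python) =====
-- # Pad-zip reformulation: instead of recursing with three cases, extract the word
-- # prefixes on both sides once and zip them, padding the shorter one with '/'.
-- def make_query(chunks, pos):
--   cleared = [c['text'] + (' ' if 'wordend' in c else '') for c in chunks]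
--   word = cleared[pos]
--   after = ''.join(cleared[pos+1:])
--   before = ''.join(cleared[:pos])[::-1]
--   a = '' if word.endswith(' ') else _head(after)
--   if word.endswith(' '):
--     word = word.rstrip()
--   b = _head(before)
--   out = [word]
--   for i in range(max(len(a), len(b))):
--     out.append(a[i] if i < len(a) else '/')
--     out.append(b[i] if i < len(b) else '/')
--   return out
--
-- def _head(s):
--   i = s.find(' ')
--   return s if i < 0 else s[:i]
-- ===== Notes on version B (the rewrite author's own statement) =====
-- stated objective: alternative
-- what changed: The three-way recursion of intersperse is replaced by extracting each side's word prefix (up to the first space) once with find/slice and pad-zipping the two prefixes with '/' in a single indexed loop; the in-place list mutation is replaced by clearing the 'after' prefix directly.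
-- intended difference: On a single-chunk list queried at pos = -1 whose cleared chunk ends with a space, A returns the word with a spurious leading space (e.g. [' x']) because its ' '-prepend at pos+1 = 0 wraps onto the very chunk being queried, while B returns the stripped word itself (['x']), which is the intended value. — e.g. on make_query([[("text", "x ")]], -1): A returns [" x"], B returns ["x"]
import Mathlib
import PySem

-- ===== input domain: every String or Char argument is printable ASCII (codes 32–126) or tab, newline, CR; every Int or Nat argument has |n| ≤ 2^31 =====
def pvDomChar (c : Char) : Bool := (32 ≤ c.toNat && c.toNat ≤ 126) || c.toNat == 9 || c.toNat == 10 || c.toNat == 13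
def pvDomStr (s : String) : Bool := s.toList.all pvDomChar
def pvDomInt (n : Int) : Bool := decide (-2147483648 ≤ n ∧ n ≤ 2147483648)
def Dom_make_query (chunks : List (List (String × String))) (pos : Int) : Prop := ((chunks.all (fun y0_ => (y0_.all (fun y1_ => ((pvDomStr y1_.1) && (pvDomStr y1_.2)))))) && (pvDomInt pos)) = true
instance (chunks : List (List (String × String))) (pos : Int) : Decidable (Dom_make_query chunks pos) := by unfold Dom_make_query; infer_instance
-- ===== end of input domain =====

-- B replaces the three-way recursion of intersperse by extracting the word prefix on each
-- side once and pad-zipping the two prefixes with '/'; equivalence of the RETURN values is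
-- proved (A mutates its local list only, so there is no observable side effect).

-- ===== PORT A =====
-- clear(x): x['text'] (+' ' if 'wordend' in x); strings are carried as List Char so the
-- kernel can unfold concatenation; dict lookup/membership via PySem.Dict (first match).
def clearA (x : List (String × String)) : List Char :=
  if (PySem.Dict.mk x).contains "wordend"
  then ((PySem.Dict.get? (PySem.Dict.mk x) "text").getD "").toList ++ [' ']
  else ((PySem.Dict.get? (PySem.Dict.mk x) "text").getD "").toList

-- "len(s) == 0 or s[0] == ' '" (the headD default is never consulted when s is nonempty)
def pvDead (s : List Char) : Bool := s.length == 0 || (s.headD ' ' == ' ')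

def intersperseA (a b : List Char) : List String :=
  if pvDead a && pvDead b then []
  else if pvDead a then "/" :: String.ofList [b.headD ' '] :: intersperseA a b.tail
  else if pvDead b then String.ofList [a.headD ' '] :: "/" :: intersperseA a.tail b
  else String.ofList [a.headD ' '] :: String.ofList [b.headD ' '] :: intersperseA a.tail b.tail
termination_by a.length + b.length
decreasing_by
  · have hb : pvDead b = false := by
      by_contra hb'; exact ‹¬ (pvDead a && pvDead b) = true› (by simp_all)
    have : b.length ≠ 0 := by
      simp only [pvDead, Bool.or_eq_false_iff, beq_eq_false_iff_ne] at hb; exact hb.1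
    simp [List.length_tail]; omega
  · have ha : pvDead a = false := by
      cases hx : pvDead a <;> simp_all
    have : a.length ≠ 0 := by
      simp only [pvDead, Bool.or_eq_false_iff, beq_eq_false_iff_ne] at ha; exact ha.1
    simp [List.length_tail]; omega
  · have ha : pvDead a = false := by
      cases hx : pvDead a <;> simp_all
    have : a.length ≠ 0 := by
      simp only [pvDead, Bool.or_eq_false_iff, beq_eq_false_iff_ne] at ha; exact ha.1
    simp [List.length_tail]; omega

-- ''.join of a list of char-lists is flatten; cleared[pos] reads use pyGetD (Pre_ keeps the
-- index in range); the two list-item assignments are pySetD (Python index semantics).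
def make_query (chunks : List (List (String × String))) (pos : Int) : List String :=
  let cleared := chunks.map clearA
  let cleared2 :=
    if PySem.Chars.endswith (PySem.List.pyGetD cleared pos []) [' '] then
      let c1 := PySem.List.pySetD cleared pos (PySem.Chars.rstrip (PySem.List.pyGetD cleared pos []))
      if pos + 1 ≤ (c1.length : Int) then
        PySem.List.pySetD c1 (pos + 1) ([' '] ++ PySem.List.pyGetD c1 (pos + 1) [])
      else c1 ++ [[' ']]
    else cleared
  String.ofList (PySem.List.pyGetD cleared2 pos []) ::
    intersperseA (PySem.List.slice cleared2 (some (pos + 1)) none).flatten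
      (((PySem.List.slice cleared2 none (some pos)).reverse.map List.reverse).flatten)

-- ===== PORT B =====
def clearB (x : List (String × String)) : List Char :=
  ((PySem.Dict.get? (PySem.Dict.mk x) "text").getD "").toList ++
    (if (PySem.Dict.mk x).contains "wordend" then [' '] else [])

-- _head(s): s up to (excluding) the first space — s.find(' ') then s[:i]
def headB (s : List Char) : List Char :=
  let i := PySem.Chars.find s [' ']
  if i < 0 then s else PySem.List.slice s none (some i)

def make_query_alt (chunks : List (List (String × String))) (pos : Int) : List String :=
  let cleared := chunks.map clearB
  let word := PySem.List.pyGetD cleared pos []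
  let after := (PySem.List.slice cleared (some (pos + 1)) none).flatten
  let before := ((PySem.List.slice cleared none (some pos)).flatten).reverse
  let a := if PySem.Chars.endswith word [' '] then [] else headB after
  let word2 := if PySem.Chars.endswith word [' '] then PySem.Chars.rstrip word else word
  let b := headB before
  (List.range (max a.length b.length)).foldl
    (fun out i => out ++ [String.ofList [a.getD i '/'], String.ofList [b.getD i '/']])
    [String.ofList word2]

-- ===== PRECONDITION & SPEC =====
-- the cleared chunk ends with a space iff it has 'wordend' or its text ends with ' '
def pvEndsSpace (x : List (String × String)) : Bool :=
  (PySem.Dict.mk x).contains "wordend" ||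
    PySem.Chars.endswith ((PySem.Dict.get? (PySem.Dict.mk x) "text").getD "").toList [' ']

-- Pre_ excludes exactly the inputs on which A raises: a chunk without a 'text' key
-- (KeyError), pos out of range (IndexError), and pos = len-1 when that cleared chunk ends
-- with ' ' (IndexError at the cleared[pos+1] assignment).
def Pre_make_query (chunks : List (List (String × String))) (pos : Int) : Prop :=
  PySem.Raise.InRange chunks.length pos ∧
  (∀ x ∈ chunks, (PySem.Dict.mk x).contains "text" = true) ∧
  ¬ (pos = (chunks.length : Int) - 1 ∧ pvEndsSpace (chunks.getD pos.toNat []) = true)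

instance (chunks : List (List (String × String))) (pos : Int) : Decidable (Pre_make_query chunks pos) := by
  unfold Pre_make_query; infer_instance

def pvWitness_make_query : (List (List (String × String))) × Int := ([[("text", "la")], [("text", "mi")]], 0)

-- On a single chunk queried at pos = -1 whose cleared text ends with a space, A returns the
-- word with a spurious leading space (its ' '-prepend at pos+1 = 0 wraps onto the very chunk
-- it is querying), while B returns the stripped word itself, which is the intended value.
-- closed-form 'the cleared chunk ends with a space': a 'wordend' key, or the first
-- 'text' value's last character is ' ' (stated with plain list primitives)
def pvTrailingSpace (x : List (String × String)) : Bool :=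
  x.any (fun p => p.1 == "wordend") ||
    (match x.find? (fun p => p.1 == "text") with
     | some p => p.2.toList.getLast? == some ' '
     | none => false)

def D_make_query (chunks : List (List (String × String))) (pos : Int) : Prop :=
  chunks.length = 1 ∧ pos = -1 ∧ pvTrailingSpace (chunks.getD 0 []) = true

instance (chunks : List (List (String × String))) (pos : Int) : Decidable (D_make_query chunks pos) := by
  unfold D_make_query; infer_instance

def Spec_make_query (chunks : List (List (String × String))) (pos : Int) (out : List String) : Prop := ¬ D_make_query chunks pos → out = make_query_alt chunks pos
instance (chunks : List (List (String × String))) (pos : Int) (out : List String) : Decidable (Spec_make_query chunks pos out) := by unfold Spec_make_query; infer_instance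

def pvDiffWitness_make_query : (List (List (String × String))) × Int := ([[("text", "x ")]], -1)
def pvDiffWitnessOut_make_query : (List String) × (List String) := ([" x"], ["x"])

-- ===== CLAIM (what is proved, stated in full; the proofs are below) =====
def Claim_unchanged_make_query : Prop := ∀ (chunks : List (List (String × String))) (pos : Int), Dom_make_query chunks pos → Pre_make_query chunks pos → Spec_make_query chunks pos (make_query chunks pos)
def Claim_changed_make_query : Prop := Dom_make_query (pvDiffWitness_make_query.1) (pvDiffWitness_make_query.2) ∧ Pre_make_query (pvDiffWitness_make_query.1) (pvDiffWitness_make_query.2) ∧ D_make_query (pvDiffWitness_make_query.1) (pvDiffWitness_make_query.2) ∧ make_query (pvDiffWitness_make_query.1) (pvDiffWitness_make_query.2) = pvDiffWitnessOut_make_query.1 ∧ make_query_alt (pvDiffWitness_make_query.1) (pvDiffWitness_make_query.2) = pvDiffWitnessOut_make_query.2 ∧ pvDiffWitnessOut_make_query.1 ≠ pvDiffWitnessOut_make_query.2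
def Claim_exact_make_query : Prop := ∀ (chunks : List (List (String × String))) (pos : Int), Dom_make_query chunks pos → Pre_make_query chunks pos → D_make_query chunks pos → make_query chunks pos ≠ make_query_alt chunks pos

-- ===== LEMMAS AND PROOFS =====

-- the pad-zip both implementations compute: pairs (a_i or '/', b_i or '/')
def padB : List Char → List String
  | [] => []
  | d :: u => "/" :: String.ofList [d] :: padB u

def padZip : List Char → List Char → List String
  | [], y => padB y
  | c :: t, [] => String.ofList [c] :: "/" :: padZip t []
  | c :: t, d :: u => String.ofList [c] :: String.ofList [d] :: padZip t u

-- the word prefix: everything before the first space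
def hw (s : List Char) : List Char := s.takeWhile (fun c => c != ' ')

theorem clearA_eq_clearB : clearA = clearB := by
  funext x
  unfold clearA clearB
  split <;> simp

theorem hw_of_dead (s : List Char) (h : pvDead s = true) : hw s = [] := by
  match s with
  | [] => rfl
  | c :: t =>
    simp only [pvDead, List.length_cons, List.headD_cons, Bool.or_eq_true, beq_iff_eq] at h
    rcases h with h | h
    · omega
    · simp [hw, h]

theorem not_dead_shape (s : List Char) (h : pvDead s = false) :
    ∃ c t, s = c :: t ∧ c ≠ ' ' := by
  match s with
  | [] => simp [pvDead] at h
  | c :: t =>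
    simp only [pvDead, List.length_cons, List.headD_cons, Bool.or_eq_false_iff,
      beq_eq_false_iff_ne] at h
    exact ⟨c, t, rfl, h.2⟩

theorem hw_cons (c : Char) (t : List Char) (h : c ≠ ' ') : hw (c :: t) = c :: hw t := by
  simp [hw, h]

theorem hw_space_cons (t : List Char) : hw (' ' :: t) = [] := by simp [hw]

theorem hw_append_space (s : List Char) : hw (s ++ [' ']) = hw s := by
  induction s with
  | nil => simp [hw]
  | cons c t ih =>
    by_cases h : c = ' '
    · subst h; simp [hw_space_cons]
    · rw [List.cons_append, hw_cons c _ h, hw_cons c t h, ih]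

-- L1: the recursion computes the pad-zip of the two word prefixes
theorem intersperseA_eq_padZip (a b : List Char) :
    intersperseA a b = padZip (hw a) (hw b) := by
  induction a, b using intersperseA.induct with
  | case1 a b h =>
    rw [intersperseA, if_pos h]
    rw [Bool.and_eq_true] at h
    rw [hw_of_dead a h.1, hw_of_dead b h.2]
    simp [padZip, padB]
  | case2 a b h ha ih =>
    have hb : pvDead b = false := by
      by_contra hb'; exact h (by simp_all)
    obtain ⟨d, u, rfl, hd⟩ := not_dead_shape b hb
    simp only [List.tail_cons] at ih
    rw [intersperseA, if_neg h, if_pos ha]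
    simp only [List.headD_cons, List.tail_cons]
    rw [ih, hw_of_dead a ha, hw_cons d u hd]
    simp [padZip, padB]
  | case3 a b h ha hb ih =>
    have ha' : pvDead a = false := by cases hx : pvDead a <;> simp_all
    obtain ⟨c, t, rfl, hc⟩ := not_dead_shape a ha'
    simp only [List.tail_cons] at ih
    rw [intersperseA, if_neg h, if_neg ha, if_pos hb]
    simp only [List.headD_cons, List.tail_cons]
    rw [ih, hw_of_dead b hb, hw_cons c t hc]
    simp [padZip]
  | case4 a b h ha hb ih =>
    have ha' : pvDead a = false := by cases hx : pvDead a <;> simp_all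
    have hb' : pvDead b = false := by cases hx : pvDead b <;> simp_all
    obtain ⟨c, t, rfl, hc⟩ := not_dead_shape a ha'
    obtain ⟨d, u, hbu, hd⟩ := not_dead_shape b hb'
    subst hbu
    simp only [List.tail_cons] at ih
    rw [intersperseA, if_neg h, if_neg ha, if_neg hb]
    simp only [List.headD_cons, List.tail_cons]
    rw [ih, hw_cons c t hc, hw_cons d u hd]
    simp [padZip]

-- L2: B's indexed loop over range(max(len a, len b)) builds the same pad-zip
theorem foldl_range_eq_padB (y : List Char) (init : List String) :
    (List.range y.length).foldl
      (fun out i => out ++ [String.ofList [List.getD ([] : List Char) i '/'], String.ofList [y.getD i '/']]) init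
      = init ++ padB y := by
  induction y generalizing init with
  | nil => simp [padB]
  | cons d u ih =>
    simp only [List.length_cons, List.range_succ_eq_map, List.foldl_cons, List.foldl_map]
    simpa [padB, Nat.succ_eq_add_one, List.getD_cons_succ] using
      ih (init ++ [String.ofList ['/'], String.ofList [d]])

theorem foldl_range_eq_padZip (x y : List Char) (init : List String) :
    (List.range (max x.length y.length)).foldl
      (fun out i => out ++ [String.ofList [x.getD i '/'], String.ofList [y.getD i '/']]) init
      = init ++ padZip x y := by
  induction x, y using padZip.induct generalizing init with
  | case1 y =>
    simp only [List.length_nil, Nat.zero_max]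
    rw [show padZip [] y = padB y from rfl, ← foldl_range_eq_padB y init]
  | case2 c t ih =>
    simp only [List.length_nil, Nat.max_zero] at ih
    simp only [List.length_nil, List.length_cons, Nat.max_zero, List.range_succ_eq_map,
      List.foldl_cons, List.foldl_map]
    simpa [padZip, Nat.succ_eq_add_one, List.getD_cons_succ] using
      ih (init ++ [String.ofList [c], String.ofList ['/']])
  | case3 c t d u ih =>
    simp only [List.length_cons, Nat.succ_max_succ, List.range_succ_eq_map,
      List.foldl_cons, List.foldl_map]
    simpa [padZip, Nat.succ_eq_add_one, List.getD_cons_succ] using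
      ih (init ++ [String.ofList [c], String.ofList [d]])

theorem singleton_prefix_iff (a : Char) (l : List Char) : [a] <+: l ↔ l.head? = some a := by
  cases l <;> simp [List.cons_prefix_cons, eq_comm]

theorem take_eq_takeWhile_of (s : List Char) (n : Nat) (hn : s[n]? = some ' ')
    (hlt : ∀ j, j < n → s[j]? ≠ some ' ') : s.take n = hw s := by
  induction s generalizing n with
  | nil => simp at hn
  | cons c t ih =>
    cases n with
    | zero =>
      simp only [List.getElem?_cons_zero, Option.some.injEq] at hn
      subst hn; rw [hw_space_cons]; rfl
    | succ m =>
      have hc : c ≠ ' ' := by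
        intro h; exact hlt 0 (Nat.succ_pos m) (by simp [h])
      rw [List.take_succ_cons, hw_cons c t hc]
      refine congrArg (c :: ·) (ih m (by simpa using hn) ?_)
      intro j hj h
      exact hlt (j + 1) (by omega) (by simpa using h)

-- L3: B's find-based _head is the word prefix
theorem headB_eq_hw (s : List Char) : headB s = hw s := by
  unfold headB
  by_cases h : PySem.Chars.find s [' '] < 0
  · have h1 : PySem.Chars.find s [' '] = -1 := le_antisymm (by omega) (PySem.Chars.neg_one_le_find s [' '])
    have h2 : ¬ [' '] <:+: s := (PySem.Chars.find_eq_neg_one_iff s [' ']).mp h1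
    rw [List.singleton_infix_iff] at h2
    simp only [h, if_true]
    exact ((List.takeWhile_eq_self_iff).mpr (by
      intro c hc
      simp only [bne_iff_ne, ne_eq]
      exact fun he => h2 (he ▸ hc))).symm
  · rw [not_lt] at h
    obtain ⟨hpre, hmin⟩ := PySem.Chars.find_spec (s := s) (sub := [' ']) h
    simp only [not_lt.mpr h, if_false, PySem.List.slice_to s h]
    apply take_eq_takeWhile_of
    · rw [singleton_prefix_iff, List.head?_drop] at hpre
      exact hpre
    · intro j hj he
      exact hmin j hj (by rw [singleton_prefix_iff, List.head?_drop]; exact he)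

theorem endswith_space_eq_getLast (s : List Char) :
    (s.getLast? == some ' ') = PySem.Chars.endswith s [' '] := by
  by_cases h : s.getLast? = some ' '
  · obtain ⟨ys, rfl⟩ := List.getLast?_eq_some_iff.mp h
    rw [(PySem.Chars.endswith_iff _ _).mpr ⟨ys, rfl⟩]
    simp [h]
  · have hf : PySem.Chars.endswith s [' '] = false := by
      rw [← Bool.not_eq_true, PySem.Chars.endswith_iff]
      intro hs
      obtain ⟨t, rfl⟩ := hs
      exact h (by simp)
    simp [h, hf]

theorem pvEndsSpace_eq (x : List (String × String)) :
    pvEndsSpace x = PySem.Chars.endswith (clearB x) [' '] := by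
  unfold pvEndsSpace clearB
  by_cases h : (PySem.Dict.mk x).contains "wordend"
  · simp only [h, if_true, Bool.true_or]
    exact ((PySem.Chars.endswith_iff _ _).mpr (List.suffix_append _ _)).symm
  · simp [h]

theorem trailing_eq (x : List (String × String)) : pvTrailingSpace x = pvEndsSpace x := by
  unfold pvTrailingSpace pvEndsSpace
  rw [PySem.Dict.contains_mk]
  congr 1
  induction x with
  | nil => decide
  | cons p rest ih =>
    obtain ⟨k, v⟩ := p
    rw [List.find?_cons, PySem.Dict.get?_mk_cons]
    by_cases hk : (k == "text") = true
    · simp only [hk, if_true]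
      exact endswith_space_eq_getLast v.toList
    · simp only [Bool.not_eq_true] at hk
      simp only [hk, Bool.false_eq_true, if_false]
      exact ih

-- Python's negative-index assignment xs[-k] = v
theorem pySetD_neg_natCast {α : Type} (xs : List α) (k : Nat) (v : α) (h1 : 0 < k)
    (h2 : k ≤ xs.length) : PySem.List.pySetD xs (-(k : Int)) v = xs.set (xs.length - k) v := by
  unfold PySem.List.pySetD PySem.List.pySet? PySem.List.pyIdx?
  rw [if_neg (by omega), if_pos (by omega)]
  simp

theorem revflat {α : Type} (l : List (List α)) :
    (l.reverse.map List.reverse).flatten = l.flatten.reverse := by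
  rw [List.reverse_flatten, List.map_reverse]

-- shared endgame for the trailing-space branch at normalised index q (0 ≤ q, q+1 < len)
theorem endswith_endgame (cl : List (List Char)) (q : Nat) (hq : q + 1 < cl.length)
    (W : List Char) :
    String.ofList W ::
      intersperseA
        ((((cl.set q W).set (q + 1) (' ' :: cl.getD (q + 1) [])).drop (q + 1)).flatten)
        (((((cl.set q W).set (q + 1) (' ' :: cl.getD (q + 1) [])).take q).reverse.map List.reverse).flatten)
      = (List.range (max (List.length ([] : List Char)) (headB ((cl.take q).flatten.reverse)).length)).foldl
          (fun out i => out ++ [String.ofList [List.getD ([] : List Char) i '/'],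
                                String.ofList [(headB ((cl.take q).flatten.reverse)).getD i '/']])
          [String.ofList W] := by
  have hdrop : ((cl.set q W).set (q + 1) (' ' :: cl.getD (q + 1) [])).drop (q + 1)
      = (' ' :: cl.getD (q + 1) []) :: cl.drop (q + 2) := by
    have hlt : ((cl.set q W).take (q + 1)).length = q + 1 := by simp; omega
    rw [List.set_eq_take_cons_drop _ (by simp; omega), List.drop_left' hlt,
      List.drop_set_of_lt (by omega)]
  have htake : ((cl.set q W).set (q + 1) (' ' :: cl.getD (q + 1) [])).take q = cl.take q := by
    rw [List.take_set_of_le (by omega), List.take_set_of_le (le_refl q)]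
  rw [hdrop, htake, revflat,
    intersperseA_eq_padZip, foldl_range_eq_padZip, headB_eq_hw]
  simp only [List.flatten_cons, List.cons_append, hw_space_cons]
  simp

-- ===== VERDICT (by name: the statement is the Claim_ definition above) =====
theorem make_query_spec : Claim_unchanged_make_query := by
  intro chunks pos _hdom hpre hnd
  obtain ⟨⟨hlo, hhi⟩, _htext, hcorner⟩ := hpre
  unfold make_query make_query_alt
  rw [clearA_eq_clearB]
  set cl := chunks.map clearB with hcl
  have hcll : cl.length = chunks.length := by simp [hcl]
  by_cases hE : PySem.Chars.endswith (PySem.List.pyGetD cl pos []) [' '] = true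
  case neg =>
    -- no trailing space: the list is left alone; both sides read the same slices
    rw [Bool.not_eq_true] at hE
    simp only [hE, Bool.false_eq_true, if_false]
    rw [revflat, intersperseA_eq_padZip, foldl_range_eq_padZip, headB_eq_hw, headB_eq_hw]
    rfl
  case pos =>
    have hclq : ∀ (q : Nat) (h : q < cl.length), cl.getD q [] = clearB (chunks.getD q []) := by
      intro q h
      rw [List.getD_eq_getElem cl [] h, List.getD_eq_getElem chunks [] (by omega)]
      simp [hcl]
    simp only [hE, if_true]
    have hcond : pos + 1 ≤ ((PySem.List.pySetD cl pos (PySem.Chars.rstrip (PySem.List.pyGetD cl pos []))).length : Int) := by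
      rw [PySem.List.length_pySetD]; omega
    rw [if_pos hcond]
    by_cases hm1 : pos = -1
    · -- pos = -1 with at least two chunks: the ' ' lands in front of chunk 0, which only
      -- appends a space to the reversed left context and is invisible to the word prefix
      subst hm1
      have hL2 : 2 ≤ cl.length := by
        rcases Nat.lt_or_ge cl.length 2 with h2 | h2
        · exfalso
          have hL1 : cl.length = 1 := by omega
          refine hnd ⟨by omega, rfl, ?_⟩
          rw [trailing_eq, pvEndsSpace_eq, ← hclq 0 (by omega)]
          have : PySem.List.pyGetD cl (-1) [] = cl.getD 0 [] := by
            rw [show (-1 : Int) = -((1 : Nat) : Int) by norm_num,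
              PySem.List.pyGetD_neg_natCast cl 1 [] (by omega) (by omega),
              List.getD_eq_getElem cl [] (by omega)]
            congr 1; omega
          rw [← this]; exact hE
        · exact h2
      have h01 : (-1 : Int) + 1 = 0 := by norm_num
      rw [h01]
      have e1 : PySem.List.pyGetD cl (-1) [] = cl.getD (cl.length - 1) [] := by
        rw [show (-1 : Int) = -((1 : Nat) : Int) by norm_num,
          PySem.List.pyGetD_neg_natCast cl 1 [] (by omega) (by omega),
          List.getD_eq_getElem cl [] (by omega)]
      rw [e1]
      set W := PySem.Chars.rstrip (cl.getD (cl.length - 1) []) with hW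
      have e2 : PySem.List.pySetD cl (-1) W = cl.set (cl.length - 1) W := by
        rw [show (-1 : Int) = -((1 : Nat) : Int) by norm_num,
          pySetD_neg_natCast cl 1 W (by omega) (by omega)]
      rw [e2]
      set c1 := cl.set (cl.length - 1) W with hc1
      have e3 : PySem.List.pyGetD c1 0 [] = cl.getD 0 [] := by
        rw [PySem.List.pyGetD_zero, List.getD_eq_getElem c1 [] (by simp [hc1]; omega),
          List.getD_eq_getElem cl [] (by omega)]
        simp only [hc1, List.getElem_set]
        rw [if_neg (by omega)]
      have e4 : PySem.List.pySetD c1 0 ([' '] ++ cl.getD 0 []) = c1.set 0 (' ' :: cl.getD 0 []) := by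
        rw [PySem.List.pySetD_of_nonneg _ _ (le_refl 0)]; rfl
      rw [e3, e4]
      set c2 := c1.set 0 (' ' :: cl.getD 0 []) with hc2
      have e5 : PySem.List.pyGetD c2 (-1) [] = W := by
        rw [show (-1 : Int) = -((1 : Nat) : Int) by norm_num,
          PySem.List.pyGetD_neg_natCast c2 1 [] (by omega) (by rw [hc2, hc1]; simp; omega)]
        simp only [hc2, hc1, List.length_set, List.getElem_set]
        split_ifs with h1
        · exfalso; omega
        · rfl
      have e6 : PySem.List.slice c2 (some 0) none = c2 := by
        rw [PySem.List.slice_from c2 (le_refl 0)]; rfl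
      have e7 : PySem.List.slice c2 none (some (-1)) = c2.dropLast := PySem.List.slice_to_neg_one c2
      have e9 : PySem.List.slice cl none (some (-1)) = cl.take (cl.length - 1) := by
        rw [PySem.List.slice_to_neg_one cl, List.dropLast_eq_take]
      rw [e5, e6, e7, e9]
      set X := cl.take (cl.length - 1) with hXd
      have hXne : X ≠ [] := by
        intro hempty
        have hlenX := congrArg List.length hempty
        rw [hXd] at hlenX
        simp at hlenX
        omega
      obtain ⟨x0, xt, hXc⟩ := List.exists_cons_of_ne_nil hXne
      have hx0 : x0 = cl.getD 0 [] := by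
        have h0 : X.getD 0 [] = cl.getD 0 [] := by
          rw [hXd, List.getD_eq_getElem _ [] (by simp; omega), List.getElem_take,
            List.getD_eq_getElem cl [] (by omega)]
        rw [hXc] at h0
        simpa using h0
      -- after: flatten c2 starts with the prepended space
      have hc2shape : c2 = (' ' :: cl.getD 0 []) :: c1.drop 1 := by
        rw [hc2, List.set_eq_take_cons_drop _ (by simp [hc1]; omega), List.take_zero,
          List.nil_append]
      -- before: dropLast c2 is X with chunk 0 space-prepended
      have htakec2 : c2.dropLast = (' ' :: cl.getD 0 []) :: xt := by
        rw [List.dropLast_eq_take, hc2]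
        have hlen2 : (c1.set 0 (' ' :: cl.getD 0 [])).length = cl.length := by simp [hc1]
        rw [hlen2, List.take_set, hc1, List.take_set_of_le (by omega), ← hXd, hXc]
        rfl
      have hbefA : (((' ' :: cl.getD 0 []) :: xt).reverse.map List.reverse).flatten
          = X.flatten.reverse ++ [' '] := by
        rw [revflat, hXc]
        simp [hx0]
      rw [htakec2, hc2shape, hbefA]
      rw [intersperseA_eq_padZip, foldl_range_eq_padZip, headB_eq_hw]
      simp only [List.flatten_cons, List.cons_append, hw_space_cons, hw_append_space]
      simp
    · -- generic in-range position: normalised index q with q+1 < len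
      have hq' : ∃ q : Nat, q + 1 < cl.length ∧
          (∀ (xs : List (List Char)), xs.length = cl.length →
            PySem.List.pyGetD xs pos [] = xs.getD q []) ∧
          (∀ v, PySem.List.pySetD cl pos v = cl.set q v) ∧
          (∀ (xs : List (List Char)), xs.length = cl.length →
            PySem.List.pyGetD xs (pos + 1) [] = xs.getD (q + 1) []) ∧
          (∀ (xs : List (List Char)) v, xs.length = cl.length →
            PySem.List.pySetD xs (pos + 1) v = xs.set (q + 1) v) ∧
          (∀ (xs : List (List Char)), xs.length = cl.length →
            PySem.List.slice xs (some (pos + 1)) none = xs.drop (q + 1)) ∧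
          (∀ (xs : List (List Char)), xs.length = cl.length →
            PySem.List.slice xs none (some pos) = xs.take q) := by
        by_cases hpn : 0 ≤ pos
        · -- pos ≠ len - 1 because the corner is excluded by Pre_
          have hne : pos ≠ (chunks.length : Int) - 1 := by
            intro he
            refine hcorner ⟨he, ?_⟩
            have hgg : PySem.List.pyGetD cl pos [] = cl.getD pos.toNat [] := by
              rw [PySem.List.pyGetD_eq_getElem cl [] hpn (by omega),
                List.getD_eq_getElem cl [] (by omega)]
            rw [pvEndsSpace_eq, ← hclq pos.toNat (by omega), ← hgg]
            exact hE
          refine ⟨pos.toNat, by omega, ?_, ?_, ?_, ?_, ?_, ?_⟩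
          · intro xs hxs
            rw [PySem.List.pyGetD_eq_getElem xs [] hpn (by omega),
              List.getD_eq_getElem xs [] (by omega)]
          · intro v
            rw [PySem.List.pySetD_of_nonneg cl _ hpn]
          · intro xs hxs
            rw [PySem.List.pyGetD_eq_getElem xs [] (by omega) (by omega),
              List.getD_eq_getElem xs [] (by omega)]
            congr 1; omega
          · intro xs v hxs
            rw [PySem.List.pySetD_of_nonneg xs _ (by omega)]
            congr 1; omega
          · intro xs hxs
            rw [PySem.List.slice_from xs (by omega)]
            congr 1; omega
          · intro xs hxs
            rw [PySem.List.slice_to xs hpn]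
        · rw [not_le] at hpn
          set k := (-pos).toNat with hk
          have hk2 : 2 ≤ k := by omega
          have hkl : k ≤ cl.length := by omega
          have hposk : pos = -(k : Int) := by omega
          have hpos1 : pos + 1 = -(((k - 1) : Nat) : Int) := by
            have : ((k - 1 : Nat) : Int) = (k : Int) - 1 := by omega
            omega
          refine ⟨cl.length - k, by omega, ?_, ?_, ?_, ?_, ?_, ?_⟩
          · intro xs hxs
            rw [hposk, PySem.List.pyGetD_neg_natCast xs k [] (by omega) (by omega),
              List.getD_eq_getElem xs [] (by omega)]
            congr 1; omega
          · intro v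
            rw [hposk, pySetD_neg_natCast cl k v (by omega) hkl]
          · intro xs hxs
            rw [hpos1, PySem.List.pyGetD_neg_natCast xs (k - 1) [] (by omega) (by omega),
              List.getD_eq_getElem xs [] (by omega)]
            congr 1; omega
          · intro xs v hxs
            rw [hpos1, pySetD_neg_natCast xs (k - 1) v (by omega) (by omega), hxs]
            congr 1; omega
          · intro xs hxs
            rw [hpos1, PySem.List.slice_from_neg_natCast xs (k - 1) (by omega), hxs]
            congr 1; omega
          · intro xs hxs
            rw [hposk, PySem.List.slice_to_neg_natCast xs k (by omega), hxs]
      obtain ⟨q, hq, e1, e2, e3, e4, e6, e7⟩ := hq'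
      rw [e1 cl rfl, e2 _]
      set W := PySem.Chars.rstrip (cl.getD q []) with hW
      rw [e3 _ (by simp), e4 _ _ (by simp)]
      rw [show (cl.set q W).getD (q + 1) [] = cl.getD (q + 1) [] by
        rw [List.getD_eq_getElem _ [] (by simp; omega), List.getD_eq_getElem cl [] (by omega),
          List.getElem_set, if_neg (by omega)]]
      rw [e6 _ (by simp), e7 _ (by simp), e7 cl rfl, e1 _ (by simp),
        show [' '] ++ cl.getD (q + 1) [] = ' ' :: cl.getD (q + 1) [] from rfl]
      rw [show ((cl.set q W).set (q + 1) (' ' :: cl.getD (q + 1) [])).getD q [] = W by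
        rw [List.getD_eq_getElem _ [] (by simp; omega)]
        simp only [List.getElem_set]
        simp]
      exact endswith_endgame cl q hq W

theorem make_query_changed : Claim_changed_make_query := by
  unfold Claim_changed_make_query
  refine ⟨by decide, by decide, by decide, ?_, by decide, by decide⟩
  show make_query [[("text", "x ")]] (-1) = [" x"]
  simp only [make_query]
  rw [intersperseA_eq_padZip]
  decide

theorem make_query_tight : Claim_exact_make_query := by
  intro chunks pos _hdom _hpre hd
  obtain ⟨h1, h2, h3⟩ := hd
  subst h2
  obtain ⟨x, rfl⟩ := List.length_eq_one_iff.mp h1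
  rw [trailing_eq, pvEndsSpace_eq] at h3
  simp only [List.getD_cons_zero] at h3
  set t := clearB x with ht
  intro h
  -- evaluate both sides on the singleton chunk list
  have hA : make_query [x] (-1) = [String.ofList (' ' :: PySem.Chars.rstrip t)] := by
    unfold make_query
    rw [clearA_eq_clearB]
    simp only [List.map_cons, List.map_nil, ← ht]
    have e1 : PySem.List.pyGetD [t] (-1) [] = t := by
      rw [show (-1 : Int) = -((1 : Nat) : Int) by norm_num,
        PySem.List.pyGetD_neg_natCast [t] 1 [] (by omega) (by simp)]; rfl
    rw [e1, h3, if_pos rfl]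
    have e2 : PySem.List.pySetD [t] (-1) (PySem.Chars.rstrip t) = [PySem.Chars.rstrip t] := by
      rw [show (-1 : Int) = -((1 : Nat) : Int) by norm_num,
        pySetD_neg_natCast [t] 1 _ (by omega) (by simp)]
      rfl
    rw [e2, if_pos (by simp)]
    have e3 : PySem.List.pyGetD [PySem.Chars.rstrip t] (-1 + 1) [] = PySem.Chars.rstrip t := by
      rw [show (-1 : Int) + 1 = 0 by norm_num, PySem.List.pyGetD_zero]; rfl
    rw [e3]
    have e4 : PySem.List.pySetD [PySem.Chars.rstrip t] (-1 + 1) ([' '] ++ PySem.Chars.rstrip t)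
        = [' ' :: PySem.Chars.rstrip t] := by
      rw [show (-1 : Int) + 1 = 0 by norm_num, PySem.List.pySetD_of_nonneg _ _ (le_refl 0)]
      rfl
    rw [e4]
    have e5 : PySem.List.pyGetD [' ' :: PySem.Chars.rstrip t] (-1) [] = ' ' :: PySem.Chars.rstrip t := by
      rw [show (-1 : Int) = -((1 : Nat) : Int) by norm_num,
        PySem.List.pyGetD_neg_natCast _ 1 [] (by omega) (by simp)]; rfl
    have e6 : PySem.List.slice [' ' :: PySem.Chars.rstrip t] (some (-1 + 1)) none
        = [' ' :: PySem.Chars.rstrip t] := by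
      rw [show (-1 : Int) + 1 = 0 by norm_num, PySem.List.slice_from _ (le_refl 0)]; rfl
    have e7 : PySem.List.slice [' ' :: PySem.Chars.rstrip t] none (some (-1)) = [] :=
      PySem.List.slice_to_neg_one _
    rw [e5, e6, e7]
    rw [intersperseA_eq_padZip]
    simp [hw, padZip, padB]
  have hB : make_query_alt [x] (-1) = [String.ofList (PySem.Chars.rstrip t)] := by
    unfold make_query_alt
    simp only [List.map_cons, List.map_nil, ← ht]
    have e1 : PySem.List.pyGetD [t] (-1) [] = t := by
      rw [show (-1 : Int) = -((1 : Nat) : Int) by norm_num,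
        PySem.List.pyGetD_neg_natCast [t] 1 [] (by omega) (by simp)]; rfl
    rw [e1, h3]
    have e7 : PySem.List.slice [t] none (some (-1)) = [] := PySem.List.slice_to_neg_one _
    rw [e7]
    simp [headB_eq_hw, hw]
  rw [hA, hB] at h
  injection h with hh _
  have hts := congrArg String.toList hh
  simp only [String.toList_ofList] at hts
  have hlen := congrArg List.length hts
  simp at hlen
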